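-- pv_equiv track=rewrite | github.com/venky1908112-droid/DSA | 4295-count-indices-with-opposite-parity/count-indices-with-opposite-parity.py | countOppositeParity
-- ===== SOURCE A (Python) =====
-- def countOppositeParity(nums: list[int]) -> list[int]:
--     n = len(nums)
--     res = []
--     def isodd(n):
--         return n & 1
--     for i in range(n):
--         count = 0
--         for j  in range(n - 1, i - 1, -1):
--             if isodd(nums[i]) != isodd(nums[j]):
--                 count += 1
--         res.append(count)
--
--     return res
-- ===== SOURCE B (Python) =====
-- def countOppositeParity(nums: list[int]) -> list[int]:
--     res = []
--     even = odd = 0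
--     for x in reversed(nums):
--         if x % 2 != 0:
--             res.append(even)
--             odd += 1
--         else:
--             res.append(odd)
--             even += 1
--     res.reverse()
--     return res
-- ===== Notes on version B (the rewrite author's own statement) =====
-- stated objective: faster
-- what changed: Replaces the quadratic per-index rescan of the suffix with one backward pass that maintains running even/odd counts of the already-seen suffix.
import Mathlib
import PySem

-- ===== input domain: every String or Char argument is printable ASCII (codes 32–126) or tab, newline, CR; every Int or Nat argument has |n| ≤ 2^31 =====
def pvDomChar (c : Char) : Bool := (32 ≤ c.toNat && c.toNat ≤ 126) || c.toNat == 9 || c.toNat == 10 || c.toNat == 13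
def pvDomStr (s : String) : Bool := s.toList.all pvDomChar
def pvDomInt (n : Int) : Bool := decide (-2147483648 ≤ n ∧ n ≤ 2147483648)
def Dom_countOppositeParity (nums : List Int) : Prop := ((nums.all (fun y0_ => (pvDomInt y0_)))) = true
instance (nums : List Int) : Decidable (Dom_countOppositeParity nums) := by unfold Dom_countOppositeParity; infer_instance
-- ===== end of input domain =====

-- B replaces A's quadratic per-index suffix rescan with one backward pass keeping running even/odd counts.


-- ===== PORT A =====
-- literal port of A: for each i, scan j = n-1 … i and count opposite parities (isodd n = n & 1)
def countOppositeParity (nums : List Int) : List Int :=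
  (PySem.List.pyRange 0 (nums.length : Int) 1).foldl
    (fun res i =>
      res ++ [(PySem.List.pyRange ((nums.length : Int) - 1) (i - 1) (-1)).foldl
        (fun count j =>
          if PySem.Int.band (PySem.List.pyGetD nums i 0) 1 ≠ PySem.Int.band (PySem.List.pyGetD nums j 0) 1
          then count + 1 else count) (0 : Int)])
    []

-- ===== PORT B =====
-- loop body of B's single backward pass (state: res so far, even count, odd count)
def stepB (st : List Int × Int × Int) (x : Int) : List Int × Int × Int :=
  if PySem.Int.mod x 2 ≠ 0 then (st.1 ++ [st.2.1], st.2.1, st.2.2 + 1)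
  else (st.1 ++ [st.2.2], st.2.1 + 1, st.2.2)

def countOppositeParity_alt (nums : List Int) : List Int :=
  (nums.reverse.foldl stepB ([], 0, 0)).1.reverse

-- ===== PRECONDITION & SPEC =====
def Spec_countOppositeParity (nums : List Int) (out : List Int) : Prop := out = countOppositeParity_alt nums
instance (nums : List Int) (out : List Int) : Decidable (Spec_countOppositeParity nums out) := by unfold Spec_countOppositeParity; infer_instance

-- ===== CLAIM (what is proved, stated in full; the proofs are below) =====
def Claim_equal_countOppositeParity : Prop := ∀ (nums : List Int), Dom_countOppositeParity nums → Spec_countOppositeParity nums (countOppositeParity nums)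

-- ===== LEMMAS AND PROOFS =====

def cntE (l : List Int) : Int := (l.countP (fun y => decide (PySem.Int.mod y 2 = 0)) : Nat)
def cntO (l : List Int) : Int := (l.countP (fun y => decide (PySem.Int.mod y 2 ≠ 0)) : Nat)

-- reference result: res[i] = #opposite-parity elements strictly after position i
def sfx : List Int → List Int
  | [] => []
  | x :: xs => ((xs.countP (fun y => decide (PySem.Int.mod x 2 ≠ PySem.Int.mod y 2)) : Nat) : Int) :: sfx xs

def buildB : List Int → Int → Int → List Int
  | [], _, _ => []
  | x :: l, e, o =>
    if PySem.Int.mod x 2 ≠ 0 then e :: buildB l e (o + 1) else o :: buildB l (e + 1) o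

def specGen : List Int → Int → Int → List Int
  | [], _, _ => []
  | x :: xs, e, o =>
    (if PySem.Int.mod x 2 ≠ 0 then e + cntE xs else o + cntO xs) :: specGen xs e o

theorem mod2_cases (x : Int) : PySem.Int.mod x 2 = 0 ∨ PySem.Int.mod x 2 = 1 := by
  have h1 := PySem.Int.mod_nonneg x (b := 2) (by norm_num)
  have h2 := PySem.Int.mod_lt x (b := 2) (by norm_num)
  omega

theorem cntE_cons_odd (x : Int) (l : List Int) (h : PySem.Int.mod x 2 ≠ 0) :
    cntE (x :: l) = cntE l := by
  simp only [cntE, List.countP_cons, decide_eq_true_eq]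
  rw [if_neg h]
  simp

theorem cntE_cons_even (x : Int) (l : List Int) (h : PySem.Int.mod x 2 = 0) :
    cntE (x :: l) = cntE l + 1 := by
  simp only [cntE, List.countP_cons, decide_eq_true_eq]
  rw [if_pos h]
  push_cast
  ring

theorem cntO_cons_odd (x : Int) (l : List Int) (h : PySem.Int.mod x 2 ≠ 0) :
    cntO (x :: l) = cntO l + 1 := by
  simp only [cntO, List.countP_cons, decide_eq_true_eq]
  rw [if_pos h]
  push_cast
  ring

theorem cntO_cons_even (x : Int) (l : List Int) (h : PySem.Int.mod x 2 = 0) :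
    cntO (x :: l) = cntO l := by
  simp only [cntO, List.countP_cons, decide_eq_true_eq]
  rw [if_neg (not_not_intro h)]
  simp

theorem cntE_reverse (l : List Int) : cntE l.reverse = cntE l := by
  simp only [cntE, List.countP_reverse]

theorem cntO_reverse (l : List Int) : cntO l.reverse = cntO l := by
  simp only [cntO, List.countP_reverse]

-- ===== A side =====

theorem countP_pyRange_pyGetD (nums : List Int) (k : Nat) (q : Int → Bool) :
    (PySem.List.pyRange (k : Int) (nums.length : Int) 1).countP
        (fun j => q (PySem.List.pyGetD nums j 0)) =
      (nums.drop k).countP q := by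
  have hm := PySem.List.map_pyGetD_pyRange' nums 0 (a := (k : Int)) (by positivity)
  calc (PySem.List.pyRange (k : Int) (nums.length : Int) 1).countP
        (fun j => q (PySem.List.pyGetD nums j 0))
      = ((PySem.List.pyRange (k : Int) (nums.length : Int) 1).map
          (fun j => PySem.List.pyGetD nums j 0)).countP q := by
        rw [List.countP_map]; rfl
    _ = (nums.drop k).countP q := by rw [hm]; simp

theorem A_eq_map (nums : List Int) :
    countOppositeParity nums =
      (List.range nums.length).map
        (fun k => (((nums.drop k).countP
          (fun y => decide (PySem.Int.mod (nums.getD k 0) 2 ≠ PySem.Int.mod y 2)) : Nat) : Int)) := by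
  unfold countOppositeParity
  rw [PySem.List.foldl_append_singleton_eq_map, List.nil_append,
      PySem.List.pyRange_zero_nat, List.map_map]
  apply List.map_congr_left
  intro k _
  show (PySem.List.pyRange ((nums.length : Int) - 1) ((k : Int) - 1) (-1)).foldl _ 0 = _
  rw [PySem.List.pyRange_neg_one_eq_reverse]
  have h1 : ((k : Int) - 1) + 1 = (k : Int) := by ring
  have h2 : ((nums.length : Int) - 1) + 1 = (nums.length : Int) := by ring
  rw [h1, h2,
      PySem.List.foldl_ite_add_one
        (fun j => PySem.Int.band (PySem.List.pyGetD nums (k : Int) 0) 1 ≠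
                  PySem.Int.band (PySem.List.pyGetD nums j 0) 1),
      List.countP_reverse, zero_add]
  rw [countP_pyRange_pyGetD nums k
      (fun y => decide (PySem.Int.band (PySem.List.pyGetD nums (k : Int) 0) 1 ≠ PySem.Int.band y 1))]
  congr 1
  apply List.countP_congr
  intro y _
  simp only [PySem.Int.band_one, PySem.List.pyGetD_natCast, decide_eq_true_eq]

theorem map_eq_sfx (l : List Int) :
    (List.range l.length).map
        (fun k => (((l.drop k).countP
          (fun y => decide (PySem.Int.mod (l.getD k 0) 2 ≠ PySem.Int.mod y 2)) : Nat) : Int)) = sfx l := by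
  induction l with
  | nil => rfl
  | cons x xs ih =>
    rw [List.length_cons, List.range_succ_eq_map, List.map_cons, List.map_map]
    simp only [List.drop_zero, List.getD_cons_zero, sfx]
    refine List.cons_eq_cons.mpr ⟨by simp, ?_⟩
    · rw [← ih]
      apply List.map_congr_left
      intro k _
      simp only [Function.comp_def, List.drop_succ_cons, List.getD_cons_succ]

-- ===== B side =====

theorem foldl_stepB (L : List Int) (res : List Int) (e o : Int) :
    L.foldl stepB (res, e, o) = (res ++ buildB L e o, e + cntE L, o + cntO L) := by
  induction L generalizing res e o with
  | nil => simp [buildB, cntE, cntO]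
  | cons x l ih =>
    by_cases h : PySem.Int.mod x 2 = 0
    · rw [List.foldl_cons, show stepB (res, e, o) x = (res ++ [o], e + 1, o) from by
        simp only [stepB]; rw [if_neg (not_not_intro h)], ih]
      rw [show buildB (x :: l) e o = o :: buildB l (e + 1) o from by
        simp only [buildB]; rw [if_neg (not_not_intro h)],
          cntE_cons_even x l h, cntO_cons_even x l h]
      simp only [List.append_assoc, List.singleton_append, Prod.mk.injEq]
      refine ⟨?_, ?_, ?_⟩ <;> first | trivial | ring
    · rw [List.foldl_cons, show stepB (res, e, o) x = (res ++ [e], e, o + 1) from by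
        simp only [stepB]; rw [if_pos h], ih]
      rw [show buildB (x :: l) e o = e :: buildB l e (o + 1) from by
        simp only [buildB]; rw [if_pos h],
          cntE_cons_odd x l h, cntO_cons_odd x l h]
      simp only [List.append_assoc, List.singleton_append, Prod.mk.injEq]
      refine ⟨?_, ?_, ?_⟩ <;> first | trivial | ring

theorem buildB_append (A B : List Int) (e o : Int) :
    buildB (A ++ B) e o = buildB A e o ++ buildB B (e + cntE A) (o + cntO A) := by
  induction A generalizing e o with
  | nil => simp [buildB, cntE, cntO]
  | cons x l ih =>
    by_cases h : PySem.Int.mod x 2 = 0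
    · have hx : ∀ (t : List Int) (e o : Int), buildB (x :: t) e o = o :: buildB t (e + 1) o :=
        fun t e o => by simp only [buildB]; rw [if_neg (not_not_intro h)]
      rw [List.cons_append, hx, hx, ih, cntE_cons_even x l h, cntO_cons_even x l h,
          List.cons_append]
      rw [show e + (cntE l + 1) = e + 1 + cntE l from by ring]
    · have hx : ∀ (t : List Int) (e o : Int), buildB (x :: t) e o = e :: buildB t e (o + 1) :=
        fun t e o => by simp only [buildB]; rw [if_pos h]
      rw [List.cons_append, hx, hx, ih, cntE_cons_odd x l h, cntO_cons_odd x l h,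
          List.cons_append]
      rw [show o + (cntO l + 1) = o + 1 + cntO l from by ring]

theorem buildB_reverse (l : List Int) (e o : Int) :
    (buildB l.reverse e o).reverse = specGen l e o := by
  induction l generalizing e o with
  | nil => simp [buildB, specGen]
  | cons x xs ih =>
    rw [List.reverse_cons, buildB_append, cntE_reverse, cntO_reverse,
        List.reverse_append, ih]
    by_cases h : PySem.Int.mod x 2 = 0
    · rw [show buildB [x] (e + cntE xs) (o + cntO xs) = [o + cntO xs] from by
        simp only [buildB]; rw [if_neg (not_not_intro h)]]
      simp only [specGen, List.reverse_cons, List.reverse_nil, List.nil_append,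
        List.singleton_append]
      rw [if_neg (not_not_intro h)]
    · rw [show buildB [x] (e + cntE xs) (o + cntO xs) = [e + cntE xs] from by
        simp only [buildB]; rw [if_pos h]]
      simp only [specGen, List.reverse_cons, List.reverse_nil, List.nil_append,
        List.singleton_append]
      rw [if_pos h]

theorem specGen_eq_sfx (l : List Int) : specGen l 0 0 = sfx l := by
  induction l with
  | nil => rfl
  | cons x xs ih =>
    simp only [specGen, sfx, ih]
    refine List.cons_eq_cons.mpr ⟨?_, rfl⟩
    rcases mod2_cases x with h | h
    · rw [if_neg (not_not_intro h), zero_add]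
      simp only [cntO]
      exact congrArg Nat.cast (List.countP_congr
        (p := fun y => decide (PySem.Int.mod y 2 ≠ 0))
        (q := fun y => decide (PySem.Int.mod x 2 ≠ PySem.Int.mod y 2)) (l := xs)
        (fun y _ => by
          have hb := mod2_cases y
          simp only [decide_eq_true_eq, ne_eq]
          rw [h]
          omega))
    · rw [if_pos (by omega), zero_add]
      simp only [cntE]
      exact congrArg Nat.cast (List.countP_congr
        (p := fun y => decide (PySem.Int.mod y 2 = 0))
        (q := fun y => decide (PySem.Int.mod x 2 ≠ PySem.Int.mod y 2)) (l := xs)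
        (fun y _ => by
          have hb := mod2_cases y
          simp only [decide_eq_true_eq, ne_eq]
          rw [h]
          omega))

-- ===== VERDICT (by name: the statement is the Claim_ definition above) =====
theorem countOppositeParity_spec : Claim_equal_countOppositeParity := by
  intro nums _
  show countOppositeParity nums = countOppositeParity_alt nums
  rw [A_eq_map, map_eq_sfx]
  unfold countOppositeParity_alt
  rw [show (([], 0, 0) : List Int × Int × Int) = (([] : List Int), (0 : Int), (0 : Int)) from rfl,
      foldl_stepB, List.nil_append]
  show sfx nums = (buildB nums.reverse 0 0).reverse
  rw [buildB_reverse, specGen_eq_sfx]
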